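-- pv_equiv track=rewrite | github.com/ffancer/study_with_codewars_part2 | 7 kyu Common Substrings.py | substring_test
-- ===== SOURCE A (Python) =====
-- def substring_test(s1, s2):
--     flag_1, flag_2 = True, True
--     for i in list(s1):
--         if i not in list(s2):
--             flag_1 = False
--
--     for j in list(s2):
--         if j not in list(s1):
--             flag_2 = False
--
--     return flag_1, flag_2
-- ===== SOURCE B (Python) =====
-- def substring_test(s1, s2):
--     u = len(set(s1 + s2))
--     return len(set(s2)) == u, len(set(s1)) == u
-- ===== Notes on version B (the rewrite author's own statement) =====
-- stated objective: faster
-- what changed: Instead of A's per-character membership rescans of the other string, B builds the set of the concatenation once and decides each direction by a cardinality comparison: chars(s1) is covered by s2 iff |set(s1+s2)| = |set(s2)|.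
import Mathlib
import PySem

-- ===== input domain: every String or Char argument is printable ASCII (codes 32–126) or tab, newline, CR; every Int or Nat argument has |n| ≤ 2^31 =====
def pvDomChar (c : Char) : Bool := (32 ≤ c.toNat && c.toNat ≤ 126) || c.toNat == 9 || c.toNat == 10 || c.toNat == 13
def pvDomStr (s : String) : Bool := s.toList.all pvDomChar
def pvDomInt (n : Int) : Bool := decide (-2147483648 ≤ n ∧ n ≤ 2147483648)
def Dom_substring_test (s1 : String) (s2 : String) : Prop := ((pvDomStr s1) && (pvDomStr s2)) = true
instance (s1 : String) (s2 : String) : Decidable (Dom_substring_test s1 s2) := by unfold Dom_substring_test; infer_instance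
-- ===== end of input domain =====

-- B replaces A's per-character rescans of the other string by one set of the concatenation and two cardinality comparisons (faster).

-- ===== PORT A =====
def substring_test (s1 : String) (s2 : String) : Bool × Bool :=
  let flag1 := s1.toList.foldl (fun f i => if i ∈ s2.toList then f else false) true
  let flag2 := s2.toList.foldl (fun f j => if j ∈ s1.toList then f else false) true
  (flag1, flag2)

-- ===== PORT B =====
def substring_test_alt (s1 : String) (s2 : String) : Bool × Bool :=
  let u := PySem.Set.len (PySem.Set.ofList (s1.toList ++ s2.toList))
  (PySem.Set.len (PySem.Set.ofList s2.toList) == u,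
   PySem.Set.len (PySem.Set.ofList s1.toList) == u)

-- ===== PRECONDITION & SPEC =====
def Spec_substring_test (s1 : String) (s2 : String) (out : Bool × Bool) : Prop := out = substring_test_alt s1 s2
instance (s1 : String) (s2 : String) (out : Bool × Bool) : Decidable (Spec_substring_test s1 s2 out) := by unfold Spec_substring_test; infer_instance

-- ===== CLAIM (what is proved, stated in full; the proofs are below) =====
def Claim_equal_substring_test : Prop := ∀ (s1 : String) (s2 : String), Dom_substring_test s1 s2 → Spec_substring_test s1 s2 (substring_test s1 s2)

-- ===== LEMMAS AND PROOFS =====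
-- A's flag loop computes "every element of l satisfies p".
theorem foldl_flag_eq_all {α : Type} (p : α → Bool) (l : List α) (b : Bool) :
    l.foldl (fun f i => if p i then f else false) b = (b && l.all p) := by
  induction l generalizing b with
  | nil => simp
  | cons x xs ih =>
    simp only [List.foldl_cons, List.all_cons, ih]
    by_cases h : p x = true <;> simp [h]

-- |set(l)| equals the Finset cardinality of l's elements.
theorem set_len_eq_card (l : List Char) :
    PySem.Set.len (PySem.Set.ofList l) = (l.toFinset.card : Int) := by
  have hn : (PySem.Set.ofList l).Nodup := PySem.Set.nodup_ofList l
  have he : (PySem.Set.ofList l).toFinset = l.toFinset := by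
    ext x; simp [List.mem_toFinset, PySem.Set.mem_ofList]
  simp [PySem.Set.len, ← List.toFinset_card_of_nodup hn, he]

-- One direction of A's test equals B's cardinality comparison.
theorem flag_eq_len (l1 l2 : List Char) :
    l1.foldl (fun f i => if i ∈ l2 then f else false) true
      = (PySem.Set.len (PySem.Set.ofList l2)
          == PySem.Set.len (PySem.Set.ofList (l1 ++ l2))) := by
  rw [show (fun f (i : Char) => if i ∈ l2 then f else false)
        = (fun f i => if decide (i ∈ l2) then f else false) by funext f i; simp,
      foldl_flag_eq_all, set_len_eq_card, set_len_eq_card]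
  rw [Bool.eq_iff_iff]
  simp only [Bool.true_and, List.all_eq_true, decide_eq_true_eq, beq_iff_eq,
    List.toFinset_append, Int.natCast_inj]
  constructor
  · intro h
    congr 1
    apply Finset.Subset.antisymm (Finset.subset_union_right)
    intro x hx
    rcases Finset.mem_union.mp hx with hx | hx
    · exact List.mem_toFinset.mpr (h x (List.mem_toFinset.mp hx))
    · exact hx
  · intro h x hx
    have hsub : l1.toFinset ∪ l2.toFinset ⊆ l2.toFinset :=
      Finset.eq_of_subset_of_card_le Finset.subset_union_right (le_of_eq h.symm) ▸
        Finset.Subset.refl _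
    exact List.mem_toFinset.mp (hsub (Finset.mem_union_left _ (List.mem_toFinset.mpr hx)))

-- The concatenation order does not change the cardinality.
theorem set_len_comm (l1 l2 : List Char) :
    PySem.Set.len (PySem.Set.ofList (l1 ++ l2)) = PySem.Set.len (PySem.Set.ofList (l2 ++ l1)) := by
  rw [set_len_eq_card, set_len_eq_card, List.toFinset_append, List.toFinset_append,
    Finset.union_comm]

-- ===== VERDICT (by name: the statement is the Claim_ definition above) =====
theorem substring_test_spec : Claim_equal_substring_test := by
  intro s1 s2 _
  unfold Spec_substring_test substring_test substring_test_alt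
  simp only [flag_eq_len]
  rw [set_len_comm s2.toList s1.toList]
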